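-- pv_equiv track=rewrite | github.com/AndresFVelasquez/ada-project-2025 | core/detector/shape_detector.py | combine_four_points
-- ===== SOURCE A (Python) =====
-- def combine_four_points(points: list) -> list:
--     """Generate all combinations of 4 points."""
--     results = []
--     n = len(points)
--     for i in range(n - 3):
--         for j in range(i + 1, n - 2):
--             for k in range(j + 1, n - 1):
--                 for l in range(k + 1, n):
--                     results.append(
--                         [points[i], points[j], points[k], points[l]])
--
--     return results
-- ===== SOURCE B (Python) =====
-- def combine_four_points(points: list) -> list:
--     """Generate all combinations of 4 points (recursive choose instead of four nested loops)."""
--     def choose(rest, need):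
--         if need == 0:
--             return [[]]
--         if not rest:
--             return []
--         head, tail = rest[0], rest[1:]
--         return [[head] + c for c in choose(tail, need - 1)] + choose(tail, need)
--     return choose(points, 4)
-- ===== Notes on version B (the rewrite author's own statement) =====
-- stated objective: alternative
-- what changed: Replaces the four index-nested loops with a recursive choose(rest, need) that builds size-need combinations structurally (take head / skip head), producing the same lexicographic order.
import Mathlib
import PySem

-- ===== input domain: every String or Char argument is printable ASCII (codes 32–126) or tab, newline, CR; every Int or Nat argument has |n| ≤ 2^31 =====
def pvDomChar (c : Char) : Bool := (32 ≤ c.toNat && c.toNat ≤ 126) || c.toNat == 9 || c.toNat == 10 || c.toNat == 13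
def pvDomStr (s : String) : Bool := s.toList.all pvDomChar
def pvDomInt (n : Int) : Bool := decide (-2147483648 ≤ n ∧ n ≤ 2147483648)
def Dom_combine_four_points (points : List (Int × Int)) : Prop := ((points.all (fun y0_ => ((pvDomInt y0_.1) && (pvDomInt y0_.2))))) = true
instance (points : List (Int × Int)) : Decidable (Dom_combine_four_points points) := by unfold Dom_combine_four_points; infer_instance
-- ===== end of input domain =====

-- B replaces the four index-nested loops with a recursive choose(rest, need); same output, same order.

-- ===== PORT A =====
-- literal port of A's four nested index loops (the indices are always in range, so pyGetD's default is never used)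
def combine_four_points (points : List (Int × Int)) : List (List (Int × Int)) :=
  let n : Int := points.length
  (PySem.List.pyRange 0 (n - 3) 1).foldl (fun results i =>
    (PySem.List.pyRange (i + 1) (n - 2) 1).foldl (fun results j =>
      (PySem.List.pyRange (j + 1) (n - 1) 1).foldl (fun results k =>
        (PySem.List.pyRange (k + 1) n 1).foldl (fun results l =>
          results ++ [[PySem.List.pyGetD points i (0, 0), PySem.List.pyGetD points j (0, 0),
                       PySem.List.pyGetD points k (0, 0), PySem.List.pyGetD points l (0, 0)]])
          results) results) results) []

-- ===== PORT B =====
-- port of B's recursive helper choose(rest, need): combinations that take the head, then those that skip it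
def chooseRec : Nat → List (Int × Int) → List (List (Int × Int))
  | 0, _ => [[]]
  | _ + 1, [] => []
  | m + 1, h :: t => (chooseRec m t).map (fun c => h :: c) ++ chooseRec (m + 1) t

def combine_four_points_alt (points : List (Int × Int)) : List (List (Int × Int)) :=
  chooseRec 4 points

-- ===== PRECONDITION & SPEC =====
def Spec_combine_four_points (points : List (Int × Int)) (out : List (List (Int × Int))) : Prop := out = combine_four_points_alt points
instance (points : List (Int × Int)) (out : List (List (Int × Int))) : Decidable (Spec_combine_four_points points out) := by unfold Spec_combine_four_points; infer_instance

-- ===== CLAIM (what is proved, stated in full; the proofs are below) =====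
def Claim_equal_combine_four_points : Prop := ∀ (points : List (Int × Int)), Dom_combine_four_points points → Spec_combine_four_points points (combine_four_points points)

-- ===== LEMMAS AND PROOFS =====

-- A's loop nest, generically: with r levels remaining the next index runs from a to n - (r - 1)
def idxI (points : List (Int × Int)) : Nat → Int → List (List (Int × Int))
  | 0, _ => [[]]
  | r + 1, a =>
    (PySem.List.pyRange a ((points.length : Int) - r) 1).flatMap (fun i =>
      (idxI points r (i + 1)).map (fun c => PySem.List.pyGetD points i (0, 0) :: c))

theorem chooseRec_short (r : Nat) (xs : List (Int × Int)) (h : xs.length < r) :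
    chooseRec r xs = [] := by
  induction xs generalizing r with
  | nil => cases r with | zero => omega | succ m => rfl
  | cons x t ih =>
    cases r with
    | zero => omega
    | succ m =>
      simp only [chooseRec]
      rw [ih m (by simp at h; omega), ih (m + 1) (by simp at h ⊢; omega)]
      simp

theorem flat_eq_chooseRec (r : Nat) (ys : List (Int × Int)) :
    (List.range (ys.length - r)).flatMap (fun k =>
      (chooseRec r (ys.drop (k + 1))).map (fun c => ys.getD k (0, 0) :: c))
      = chooseRec (r + 1) ys := by
  induction ys with
  | nil => simp [chooseRec]
  | cons x t ih =>
    by_cases hs : t.length < r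
    · have h0 : (x :: t).length - r = 0 := by simp; omega
      rw [h0]
      simp [chooseRec, chooseRec_short r t hs, chooseRec_short (r + 1) t (by simp; omega)]
    · have h1 : (x :: t).length - r = (t.length - r) + 1 := by simp; omega
      rw [h1, List.range_succ_eq_map, List.flatMap_cons, List.flatMap_map]
      simp only [List.drop_succ_cons, List.drop_zero, List.getD_cons_zero, List.getD_cons_succ]
      rw [ih]
      rfl

theorem idxI_eq_chooseRec (points : List (Int × Int)) (r : Nat) (a : Int) (ha : 0 ≤ a) :
    idxI points r a = chooseRec r (points.drop a.toNat) := by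
  induction r generalizing a with
  | zero => simp [idxI, chooseRec]
  | succ r ih =>
    rw [idxI, PySem.List.pyRange_one, List.flatMap_map]
    have hcnt : (((points.length : Int) - r) - a).toNat = (points.drop a.toNat).length - r := by
      simp; omega
    rw [hcnt]
    rw [← flat_eq_chooseRec r (points.drop a.toNat)]
    apply List.flatMap_congr
    intro k hk
    rw [List.mem_range] at hk
    have hx : PySem.List.pyGetD points (a + (k : Int)) (0, 0)
        = (points.drop a.toNat).getD k (0, 0) := by
      have hcast : a + (k : Int) = ((a.toNat + k : Nat) : Int) := by omega
      rw [hcast, PySem.List.pyGetD_natCast]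
      simp [List.getD, List.getElem?_drop]
    rw [hx]
    have hrec : idxI points r (a + (k : Int) + 1)
        = chooseRec r ((points.drop a.toNat).drop (k + 1)) := by
      rw [ih (a + (k : Int) + 1) (by omega)]
      congr 1
      rw [List.drop_drop]
      congr 1
      omega
    rw [hrec]

theorem map_eq_flatMap_single {α β : Type} (l : List α) (f : α → β) :
    l.map f = l.flatMap (fun x => [f x]) := by
  induction l with
  | nil => rfl
  | cons a t ih => simp [List.flatMap_cons, ih]

theorem combine_eq_idxI (points : List (Int × Int)) :
    combine_four_points points = idxI points 4 0 := by
  simp only [combine_four_points, idxI,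
    PySem.List.foldl_append_singleton_eq_map, PySem.List.foldl_append_eq_flatMap,
    List.map_flatMap, List.map_map]
  norm_num [map_eq_flatMap_single]

-- ===== VERDICT (by name: the statement is the Claim_ definition above) =====
theorem combine_four_points_spec : Claim_equal_combine_four_points := by
  intro points _
  show combine_four_points points = combine_four_points_alt points
  rw [combine_eq_idxI, idxI_eq_chooseRec points 4 0 le_rfl]
  rfl
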